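-- pv_equiv track=rewrite | github.com/LintangWisesa/Python_Fundamental_DataScience | 0 Python Fundamental/15.z_ubahVokal.py | translate2
-- ===== SOURCE A (Python) =====
-- def translate2(kata):
--     ubah = ''
--     for huruf in kata:
--         if huruf.lower() in 'aiueo':
--             if huruf.isupper():
--                 ubah = ubah + 'G'
--             else:
--                 ubah = ubah + 'g'
--         else:
--             ubah = ubah + huruf
--     return ubah
-- ===== SOURCE B (Python) =====
-- _TABLE = str.maketrans('aiueoAIUEO', 'gggggGGGGG')
--
-- def translate2(kata):
--     return kata.translate(_TABLE)
-- ===== Notes on version B (the rewrite author's own statement) =====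
-- stated objective: idiomatic
-- what changed: Replaced the explicit accumulator loop with branch chains by a precomputed codepoint translation table applied via str.translate in one library-driven pass.
import Mathlib
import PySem

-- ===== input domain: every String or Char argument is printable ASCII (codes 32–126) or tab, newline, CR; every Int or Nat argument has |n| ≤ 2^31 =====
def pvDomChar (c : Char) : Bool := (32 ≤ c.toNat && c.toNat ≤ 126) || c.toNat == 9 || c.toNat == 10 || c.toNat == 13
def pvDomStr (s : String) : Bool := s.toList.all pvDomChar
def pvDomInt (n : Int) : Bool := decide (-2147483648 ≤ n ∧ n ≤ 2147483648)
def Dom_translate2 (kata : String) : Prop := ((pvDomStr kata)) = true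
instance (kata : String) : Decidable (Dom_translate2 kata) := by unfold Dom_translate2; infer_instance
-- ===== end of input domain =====

-- B replaces A's accumulator loop with branch chains by a precomputed char→char table applied in one map (idiomatic).

-- ===== PORT A =====
-- the loop body of A, literal: append 'G'/'g'/huruf to the accumulator
def pvStepA (ubah : List Char) (huruf : Char) : List Char :=
  if PySem.Chars.isIn [PySem.Chars.lowerChar huruf] ['a','i','u','e','o'] = true then
    (if PySem.Chars.isupper huruf = true then ubah ++ ['G'] else ubah ++ ['g'])
  else ubah ++ [huruf]

def translate2 (kata : String) : String :=
  String.mk (kata.toList.foldl pvStepA [])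

-- ===== PORT B =====
-- the translation table (str.maketrans('aiueoAIUEO', 'gggggGGGGG'))
def pvTable : List (Char × Char) :=
  [('a','g'),('i','g'),('u','g'),('e','g'),('o','g'),
   ('A','G'),('I','G'),('U','G'),('E','G'),('O','G')]

-- one table lookup, identity when the char is not in the table (= str.translate per char)
def pvTranslate (t : List (Char × Char)) (c : Char) : Char :=
  ((t.find? (fun p => p.1 == c)).map Prod.snd).getD c

def translate2_alt (kata : String) : String :=
  String.mk (kata.toList.map (pvTranslate pvTable))

-- ===== PRECONDITION & SPEC =====
def Spec_translate2 (kata : String) (out : String) : Prop := out = translate2_alt kata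
instance (kata : String) (out : String) : Decidable (Spec_translate2 kata out) := by unfold Spec_translate2; infer_instance

-- ===== CLAIM (what is proved, stated in full; the proofs are below) =====
def Claim_equal_translate2 : Prop := ∀ (kata : String), Dom_translate2 kata → Spec_translate2 kata (translate2 kata)

-- ===== LEMMAS AND PROOFS =====
def pvChrOut (c : Char) : Char :=
  if PySem.Chars.isIn [PySem.Chars.lowerChar c] ['a','i','u','e','o'] = true then
    (if PySem.Chars.isupper c = true then 'G' else 'g')
  else c

theorem pvStepA_eq (u : List Char) (c : Char) : pvStepA u c = u ++ [pvChrOut c] := by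
  unfold pvStepA pvChrOut; split_ifs <;> rfl

theorem pvChrOut_dom (c : Char) (h : pvDomChar c = true) :
    pvChrOut c = pvTranslate pvTable c := by
  have key : ∀ n : Fin 127, pvChrOut (Char.ofNat n.val) = pvTranslate pvTable (Char.ofNat n.val) := by decide
  have hl : c.toNat < 127 := by
    simp only [pvDomChar, Bool.or_eq_true, Bool.and_eq_true, decide_eq_true_eq, beq_iff_eq] at h
    omega
  have := key ⟨c.toNat, hl⟩
  simpa [Char.ofNat_toNat] using this

theorem pvFoldl_map (l : List Char) (acc : List Char) (h : ∀ c ∈ l, pvDomChar c = true) :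
    l.foldl pvStepA acc = acc ++ l.map (pvTranslate pvTable) := by
  induction l generalizing acc with
  | nil => simp
  | cons c t ih =>
      simp only [List.foldl_cons, List.map_cons]
      rw [pvStepA_eq, pvChrOut_dom c (h c (by simp)), ih _ (fun x hx => h x (by simp [hx]))]
      simp

-- ===== VERDICT (by name: the statement is the Claim_ definition above) =====
theorem translate2_spec : Claim_equal_translate2 := by
  intro kata hdom
  unfold Spec_translate2 translate2 translate2_alt
  have h : ∀ c ∈ kata.toList, pvDomChar c = true := by
    simpa [Dom_translate2, pvDomStr, List.all_eq_true] using hdom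
  rw [pvFoldl_map _ _ h]; rfl
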